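-- pv_equiv track=rewrite | github.com/telmo-correa/cow-solver-py | scripts/collect_auctions.py | categorize_auction
-- ===== SOURCE A (Python) =====
-- def categorize_auction(auction: dict) -> str:
--     """Determine the category for an auction based on its characteristics."""
--     orders = auction.get("orders", [])
--     order_count = len(orders)
--
--     if order_count == 0:
--         return "empty"
--     elif order_count == 1:
--         return "single_order"
--
--     # Check for CoW potential (opposite direction orders on same pair)
--     pairs_with_both_directions: set[tuple[str, str]] = set()
--     sell_pairs: set[tuple[str, str]] = set()
--     buy_pairs: set[tuple[str, str]] = set()
--
--     for order in orders:
--         pair = (order["sellToken"].lower(), order["buyToken"].lower())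
--         reverse_pair = (pair[1], pair[0])
--
--         if order["kind"] == "sell":
--             sell_pairs.add(pair)
--             if reverse_pair in sell_pairs or pair in buy_pairs:
--                 pairs_with_both_directions.add(tuple(sorted([pair[0], pair[1]])))
--         else:
--             buy_pairs.add(pair)
--             if reverse_pair in buy_pairs or pair in sell_pairs:
--                 pairs_with_both_directions.add(tuple(sorted([pair[0], pair[1]])))
--
--     if pairs_with_both_directions:
--         return "cow_pairs"
--
--     # Check if multi-hop routing might be needed
--     unique_tokens: set[str] = set()
--     for order in orders:
--         unique_tokens.add(order["sellToken"].lower())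
--         unique_tokens.add(order["buyToken"].lower())
--
--     if len(unique_tokens) > 4:
--         return "multi_hop"
--
--     return "standard"
-- ===== SOURCE B (Python) =====
-- def categorize_auction(auction: dict) -> str:
--     """Determine the category for an auction based on its characteristics."""
--     orders = auction.get("orders", [])
--     if len(orders) == 0:
--         return "empty"
--     if len(orders) == 1:
--         return "single_order"
--
--     # Normalize every order to a single direction signature: a buy order on
--     # (s, b) sits on the same side of the market as a sell order on (b, s),
--     # so all three of A's conflict cases (sell/sell reversed, buy/buy
--     # reversed, sell and buy on the same pair) collapse to one symmetric
--     # test on one set: some signature whose reverse is also a signature.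
--     sigs: set[tuple[str, str]] = set()
--     for order in orders:
--         s = order["sellToken"].lower()
--         b = order["buyToken"].lower()
--         sigs.add((s, b) if order["kind"] == "sell" else (b, s))
--
--     if any((b, s) in sigs for (s, b) in sigs):
--         return "cow_pairs"
--
--     tokens = {t for sig in sigs for t in sig}
--     return "multi_hop" if len(tokens) > 4 else "standard"
-- ===== Notes on version B (the rewrite author's own statement) =====
-- stated objective: simpler
-- what changed: A maintains three sets (sell pairs, buy pairs, pairs_with_both_directions) and three separate conflict tests updated incrementally inside the loop; B normalizes every order to a single direction signature (a buy order's pair is swapped), collects just ONE set of signatures, and detects CoW potential with a single symmetric test (some signature whose reverse is also present), counting tokens from the signatures.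
import Mathlib
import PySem

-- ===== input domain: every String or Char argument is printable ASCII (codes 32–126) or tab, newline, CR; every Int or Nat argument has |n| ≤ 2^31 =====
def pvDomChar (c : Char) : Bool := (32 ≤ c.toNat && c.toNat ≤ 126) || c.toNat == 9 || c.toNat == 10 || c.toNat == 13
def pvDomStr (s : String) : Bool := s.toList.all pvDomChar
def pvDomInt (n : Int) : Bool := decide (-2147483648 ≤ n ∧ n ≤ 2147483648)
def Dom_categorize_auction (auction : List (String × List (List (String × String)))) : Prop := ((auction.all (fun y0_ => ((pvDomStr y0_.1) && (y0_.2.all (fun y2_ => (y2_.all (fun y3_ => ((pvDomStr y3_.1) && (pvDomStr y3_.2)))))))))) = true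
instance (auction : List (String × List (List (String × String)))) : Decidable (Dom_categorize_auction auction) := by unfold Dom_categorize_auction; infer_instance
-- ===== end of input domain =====

-- B replaces A's three sets and three conflict cases (sell/sell reversed, buy/buy reversed,
-- sell and buy on the same pair) by ONE set of direction-normalized signatures (a buy order's
-- pair is swapped) and a single symmetric reversed-membership test; objective: simpler.

-- ===== PORT A =====
-- order["sellToken"].lower(), order["buyToken"].lower(), order["kind"] == "sell"
def pvSellTok (o : List (String × String)) : String :=
  PySem.Str.lower ((List.lookup "sellToken" o).getD "")
def pvBuyTok (o : List (String × String)) : String :=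
  PySem.Str.lower ((List.lookup "buyToken" o).getD "")
def pvKindSell (o : List (String × String)) : Bool :=
  (List.lookup "kind" o).getD "" == "sell"
def pvPair (o : List (String × String)) : String × String := (pvSellTok o, pvBuyTok o)

-- tuple(sorted([pair[0], pair[1]]))
def pvSortPair (p : String × String) : String × String :=
  let l := PySem.List.sorted [p.1, p.2] (fun x => x) false
  (l.getD 0 "", l.getD 1 "")

-- one iteration of A's loop over state (pairs_with_both_directions, sell_pairs, buy_pairs)
def pvAStep (acc : PySem.Set (String × String) × PySem.Set (String × String) × PySem.Set (String × String))
    (o : List (String × String)) :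
    PySem.Set (String × String) × PySem.Set (String × String) × PySem.Set (String × String) :=
  let p := pvPair o
  let rp := (p.2, p.1)
  if pvKindSell o then
    let sells' := PySem.Set.add acc.2.1 p
    if PySem.Set.contains sells' rp || PySem.Set.contains acc.2.2 p then
      (PySem.Set.add acc.1 (pvSortPair p), sells', acc.2.2)
    else (acc.1, sells', acc.2.2)
  else
    let buys' := PySem.Set.add acc.2.2 p
    if PySem.Set.contains buys' rp || PySem.Set.contains acc.2.1 p then
      (PySem.Set.add acc.1 (pvSortPair p), acc.2.1, buys')
    else (acc.1, acc.2.1, buys')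

def categorize_auction (auction : List (String × List (List (String × String)))) : String :=
  let orders := (List.lookup "orders" auction).getD []
  if orders.length = 0 then "empty"
  else if orders.length = 1 then "single_order"
  else
    let st := orders.foldl pvAStep ([], [], [])
    if st.1 ≠ [] then "cow_pairs"
    else
      let toks := orders.foldl
        (fun t o => PySem.Set.add (PySem.Set.add t (pvSellTok o)) (pvBuyTok o))
        ([] : PySem.Set String)
      if 4 < toks.length then "multi_hop" else "standard"

-- ===== PORT B =====
-- B's signature: (s, b) if order["kind"] == "sell" else (b, s)
def pvSig (o : List (String × String)) : String × String :=
  let s := PySem.Str.lower ((List.lookup "sellToken" o).getD "")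
  let b := PySem.Str.lower ((List.lookup "buyToken" o).getD "")
  if (List.lookup "kind" o).getD "" == "sell" then (s, b) else (b, s)

def categorize_auction_alt (auction : List (String × List (List (String × String)))) : String :=
  let orders := (List.lookup "orders" auction).getD []
  if orders.length = 0 then "empty"
  else if orders.length = 1 then "single_order"
  else
    let sigs := orders.foldl (fun t o => PySem.Set.add t (pvSig o))
      ([] : PySem.Set (String × String))
    if sigs.any (fun p => PySem.Set.contains sigs (p.2, p.1)) then "cow_pairs"
    else
      -- {t for sig in sigs for t in sig}; only its size is used
      let toks := sigs.foldl (fun t p => PySem.Set.add (PySem.Set.add t p.1) p.2)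
        ([] : PySem.Set String)
      if 4 < toks.length then "multi_hop" else "standard"

-- ===== PRECONDITION & SPEC =====
-- Pre_ excludes exactly the inputs where Python A raises KeyError: with at least two
-- orders, some order lacks a "sellToken", "buyToken" or "kind" key.
def Pre_categorize_auction (auction : List (String × List (List (String × String)))) : Prop :=
  2 ≤ ((List.lookup "orders" auction).getD []).length →
    ∀ o ∈ (List.lookup "orders" auction).getD [],
      (List.lookup "sellToken" o).isSome = true ∧
      (List.lookup "buyToken" o).isSome = true ∧
      (List.lookup "kind" o).isSome = true
instance (auction : List (String × List (List (String × String)))) : Decidable (Pre_categorize_auction auction) := by unfold Pre_categorize_auction; infer_instance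

def pvWitness_categorize_auction : (List (String × List (List (String × String)))) :=
  [("orders", [[("sellToken", "A"), ("buyToken", "B"), ("kind", "sell")],
               [("sellToken", "b"), ("buyToken", "a"), ("kind", "sell")]])]

def Spec_categorize_auction (auction : List (String × List (List (String × String)))) (out : String) : Prop := out = categorize_auction_alt auction
instance (auction : List (String × List (List (String × String)))) (out : String) : Decidable (Spec_categorize_auction auction out) := by unfold Spec_categorize_auction; infer_instance

-- ===== CLAIM (what is proved, stated in full; the proofs are below) =====
def Claim_equal_categorize_auction : Prop := ∀ (auction : List (String × List (List (String × String)))), Dom_categorize_auction auction → Pre_categorize_auction auction → Spec_categorize_auction auction (categorize_auction auction)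

-- ===== LEMMAS AND PROOFS =====

-- proof-only helper: the final sell/buy pair sets (the second and third components of A's state)
def pvSBStep (acc : PySem.Set (String × String) × PySem.Set (String × String))
    (o : List (String × String)) : PySem.Set (String × String) × PySem.Set (String × String) :=
  if pvKindSell o then (PySem.Set.add acc.1 (pvPair o), acc.2)
  else (acc.1, PySem.Set.add acc.2 (pvPair o))

-- "CoW potential" as a predicate on the final pair sets
def pvP (s b : List (String × String)) : Prop :=
  (∃ p ∈ s, (p.2, p.1) ∈ s) ∨ (∃ p ∈ b, (p.2, p.1) ∈ b) ∨ (∃ p ∈ s, p ∈ b)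

theorem pvSet_add_ne_nil {α : Type} [BEq α] (s : PySem.Set α) (x : α) :
    PySem.Set.add s x ≠ [] := by
  unfold PySem.Set.add
  split
  · intro h; simp [h] at *
  · simp

theorem pvP_add_sell (s b : List (String × String)) (p : String × String) :
    pvP (PySem.Set.add s p) b ↔
      ((p.2, p.1) ∈ PySem.Set.add s p ∨ p ∈ b) ∨ pvP s b := by
  unfold pvP
  constructor
  · rintro (⟨q, hq, hrq⟩ | h | ⟨q, hq, hqb⟩)
    · rcases (PySem.Set.mem_add s p q).mp hq with hq' | rfl
      · rcases (PySem.Set.mem_add s p (q.2, q.1)).mp hrq with hr' | hr'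
        · exact Or.inr (Or.inl ⟨q, hq', hr'⟩)
        · refine Or.inl (Or.inl ?_)
          have hq2 : (p.2, p.1) = q := by rw [← hr']
          rw [hq2]
          exact (PySem.Set.mem_add s p q).mpr (Or.inl hq')
      · exact Or.inl (Or.inl hrq)
    · exact Or.inr (Or.inr (Or.inl h))
    · rcases (PySem.Set.mem_add s p q).mp hq with hq' | rfl
      · exact Or.inr (Or.inr (Or.inr ⟨q, hq', hqb⟩))
      · exact Or.inl (Or.inr hqb)
  · rintro ((h | h) | (⟨q, hq, hrq⟩ | h | ⟨q, hqs, hqb⟩))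
    · exact Or.inl ⟨p, (PySem.Set.mem_add s p p).mpr (Or.inr rfl), h⟩
    · exact Or.inr (Or.inr ⟨p, (PySem.Set.mem_add s p p).mpr (Or.inr rfl), h⟩)
    · exact Or.inl ⟨q, (PySem.Set.mem_add s p q).mpr (Or.inl hq),
        (PySem.Set.mem_add s p (q.2, q.1)).mpr (Or.inl hrq)⟩
    · exact Or.inr (Or.inl h)
    · exact Or.inr (Or.inr ⟨q, (PySem.Set.mem_add s p q).mpr (Or.inl hqs), hqb⟩)

theorem pvP_add_buy (s b : List (String × String)) (p : String × String) :
    pvP s (PySem.Set.add b p) ↔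
      ((p.2, p.1) ∈ PySem.Set.add b p ∨ p ∈ s) ∨ pvP s b := by
  unfold pvP
  constructor
  · rintro (h | ⟨q, hq, hrq⟩ | ⟨q, hqs, hqb⟩)
    · exact Or.inr (Or.inl h)
    · rcases (PySem.Set.mem_add b p q).mp hq with hq' | rfl
      · rcases (PySem.Set.mem_add b p (q.2, q.1)).mp hrq with hr' | hr'
        · exact Or.inr (Or.inr (Or.inl ⟨q, hq', hr'⟩))
        · refine Or.inl (Or.inl ?_)
          have hq2 : (p.2, p.1) = q := by rw [← hr']
          rw [hq2]
          exact (PySem.Set.mem_add b p q).mpr (Or.inl hq')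
      · exact Or.inl (Or.inl hrq)
    · rcases (PySem.Set.mem_add b p q).mp hqb with hb' | rfl
      · exact Or.inr (Or.inr (Or.inr ⟨q, hqs, hb'⟩))
      · exact Or.inl (Or.inr hqs)
  · rintro ((h | h) | (h | ⟨q, hq, hrq⟩ | ⟨q, hqs, hqb⟩))
    · exact Or.inr (Or.inl ⟨p, (PySem.Set.mem_add b p p).mpr (Or.inr rfl), h⟩)
    · exact Or.inr (Or.inr ⟨p, h, (PySem.Set.mem_add b p p).mpr (Or.inr rfl)⟩)
    · exact Or.inl h
    · exact Or.inr (Or.inl ⟨q, (PySem.Set.mem_add b p q).mpr (Or.inl hq),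
        (PySem.Set.mem_add b p (q.2, q.1)).mpr (Or.inl hrq)⟩)
    · exact Or.inr (Or.inr ⟨q, hqs, (PySem.Set.mem_add b p q).mpr (Or.inl hqb)⟩)

-- invariant: emptiness of pairs_with_both_directions tracks pvP of the final sets
theorem pvDetect : ∀ (orders : List (List (String × String)))
    (both s b : PySem.Set (String × String)),
    (both = [] ↔ ¬ pvP s b) →
    ((orders.foldl pvAStep (both, s, b)).1 = [] ↔
      ¬ pvP (orders.foldl pvSBStep (s, b)).1 (orders.foldl pvSBStep (s, b)).2) := by
  intro orders
  induction orders with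
  | nil => intro both s b h; exact h
  | cons o t ih =>
    intro both s b h
    simp only [List.foldl_cons]
    by_cases hk : pvKindSell o <;>
      simp only [pvAStep, pvSBStep, hk, if_true, if_false, Bool.false_eq_true]
    · split
      next hc =>
        apply ih
        constructor
        · intro hnil; exact absurd hnil (pvSet_add_ne_nil _ _)
        · intro hnp
          exfalso; apply hnp
          rw [pvP_add_sell]
          rcases Bool.or_eq_true _ _ |>.mp hc with h1 | h1
          · exact Or.inl (Or.inl ((PySem.Set.contains_iff _ _).mp h1))
          · exact Or.inl (Or.inr ((PySem.Set.contains_iff _ _).mp h1))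
      next hc =>
        apply ih
        rw [pvP_add_sell]
        have h1 : ¬ ((pvPair o).2, (pvPair o).1) ∈ PySem.Set.add s (pvPair o) := by
          intro hm
          exact hc ((Bool.or_eq_true _ _).mpr (Or.inl ((PySem.Set.contains_iff _ _).mpr hm)))
        have h2 : ¬ (pvPair o) ∈ b := by
          intro hm
          exact hc ((Bool.or_eq_true _ _).mpr (Or.inr ((PySem.Set.contains_iff _ _).mpr hm)))
        rw [h]
        constructor
        · intro hnp; rintro ((hx | hx) | hx); exacts [h1 hx, h2 hx, hnp hx]
        · intro hnp hx; exact hnp (Or.inr hx)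
    · split
      next hc =>
        apply ih
        constructor
        · intro hnil; exact absurd hnil (pvSet_add_ne_nil _ _)
        · intro hnp
          exfalso; apply hnp
          rw [pvP_add_buy]
          rcases Bool.or_eq_true _ _ |>.mp hc with h1 | h1
          · exact Or.inl (Or.inl ((PySem.Set.contains_iff _ _).mp h1))
          · exact Or.inl (Or.inr ((PySem.Set.contains_iff _ _).mp h1))
      next hc =>
        apply ih
        rw [pvP_add_buy]
        have h1 : ¬ ((pvPair o).2, (pvPair o).1) ∈ PySem.Set.add b (pvPair o) := by
          intro hm
          exact hc ((Bool.or_eq_true _ _).mpr (Or.inl ((PySem.Set.contains_iff _ _).mpr hm)))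
        have h2 : ¬ (pvPair o) ∈ s := by
          intro hm
          exact hc ((Bool.or_eq_true _ _).mpr (Or.inr ((PySem.Set.contains_iff _ _).mpr hm)))
        rw [h]
        constructor
        · intro hnp; rintro ((hx | hx) | hx); exacts [h1 hx, h2 hx, hnp hx]
        · intro hnp hx; exact hnp (Or.inr hx)

-- contents of the sell/buy sets in terms of the orders
theorem pvSellBuyMem : ∀ (orders : List (List (String × String)))
    (s b : PySem.Set (String × String)) (p : String × String),
    (p ∈ (orders.foldl pvSBStep (s, b)).1 ↔
      p ∈ s ∨ ∃ o ∈ orders, pvKindSell o = true ∧ p = pvPair o) ∧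
    (p ∈ (orders.foldl pvSBStep (s, b)).2 ↔
      p ∈ b ∨ ∃ o ∈ orders, pvKindSell o = false ∧ p = pvPair o) := by
  intro orders
  induction orders with
  | nil => simp
  | cons o t ih =>
    intro s b p
    simp only [List.foldl_cons, pvSBStep]
    by_cases hk : pvKindSell o <;> simp only [hk, if_true, if_false, Bool.false_eq_true]
    · constructor
      · rw [(ih _ _ p).1]
        simp only [PySem.Set.mem_add, List.mem_cons]
        constructor
        · rintro ((h | h) | ⟨x, hx, hkx, rfl⟩)
          · exact Or.inl h
          · exact Or.inr ⟨o, Or.inl rfl, hk, h⟩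
          · exact Or.inr ⟨x, Or.inr hx, hkx, rfl⟩
        · rintro (h | ⟨x, rfl | hx, hkx, rfl⟩)
          · exact Or.inl (Or.inl h)
          · exact Or.inl (Or.inr rfl)
          · exact Or.inr ⟨x, hx, hkx, rfl⟩
      · rw [(ih _ _ p).2]
        simp only [List.mem_cons]
        constructor
        · rintro (h | ⟨x, hx, hkx, rfl⟩)
          · exact Or.inl h
          · exact Or.inr ⟨x, Or.inr hx, hkx, rfl⟩
        · rintro (h | ⟨x, rfl | hx, hkx, rfl⟩)
          · exact Or.inl h
          · exact absurd hk (by simp [hkx])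
          · exact Or.inr ⟨x, hx, hkx, rfl⟩
    · constructor
      · rw [(ih _ _ p).1]
        simp only [List.mem_cons]
        constructor
        · rintro (h | ⟨x, hx, hkx, rfl⟩)
          · exact Or.inl h
          · exact Or.inr ⟨x, Or.inr hx, hkx, rfl⟩
        · rintro (h | ⟨x, rfl | hx, hkx, rfl⟩)
          · exact Or.inl h
          · exact absurd hkx (by simp [hk])
          · exact Or.inr ⟨x, hx, hkx, rfl⟩
      · rw [(ih _ _ p).2]
        simp only [PySem.Set.mem_add, List.mem_cons]
        constructor
        · rintro ((h | h) | ⟨x, hx, hkx, rfl⟩)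
          · exact Or.inl h
          · exact Or.inr ⟨o, Or.inl rfl, by simp [hk], h⟩
          · exact Or.inr ⟨x, Or.inr hx, hkx, rfl⟩
        · rintro (h | ⟨x, rfl | hx, hkx, rfl⟩)
          · exact Or.inl (Or.inl h)
          · exact Or.inl (Or.inr rfl)
          · exact Or.inr ⟨x, hx, hkx, rfl⟩

-- membership in B's signature set
theorem pvSigMem : ∀ (orders : List (List (String × String)))
    (t0 : PySem.Set (String × String)) (p : String × String),
    p ∈ orders.foldl (fun t o => PySem.Set.add t (pvSig o)) t0 ↔
      p ∈ t0 ∨ ∃ o ∈ orders, p = pvSig o := by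
  intro orders
  induction orders with
  | nil => simp
  | cons o t ih =>
    intro t0 p
    simp only [List.foldl_cons, ih, PySem.Set.mem_add, List.mem_cons]
    constructor
    · rintro ((h | h) | ⟨x, hx, rfl⟩)
      · exact Or.inl h
      · exact Or.inr ⟨o, Or.inl rfl, h⟩
      · exact Or.inr ⟨x, Or.inr hx, rfl⟩
    · rintro (h | ⟨x, rfl | hx, rfl⟩)
      · exact Or.inl (Or.inl h)
      · exact Or.inl (Or.inr rfl)
      · exact Or.inr ⟨x, hx, rfl⟩

-- pvSig in terms of A's accessors
theorem pvSig_eq (o : List (String × String)) :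
    pvSig o = if pvKindSell o then pvPair o else ((pvPair o).2, (pvPair o).1) := by
  simp [pvSig, pvKindSell, pvPair, pvSellTok, pvBuyTok]

-- the CoW predicate on the final sell/buy sets equals B's single-set reversed-signature test
theorem pvP_iff_sig (orders : List (List (String × String))) :
    pvP (orders.foldl pvSBStep ([], [])).1 (orders.foldl pvSBStep ([], [])).2 ↔
      ∃ p ∈ orders.foldl (fun t o => PySem.Set.add t (pvSig o))
          ([] : PySem.Set (String × String)), (p.2, p.1) ∈
        orders.foldl (fun t o => PySem.Set.add t (pvSig o))
          ([] : PySem.Set (String × String)) := by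
  have hs : ∀ p : String × String, p ∈ (orders.foldl pvSBStep ([], [])).1 ↔
      ∃ o ∈ orders, pvKindSell o = true ∧ p = pvPair o := fun p => by
    rw [(pvSellBuyMem orders [] [] p).1]; simp
  have hb : ∀ p : String × String, p ∈ (orders.foldl pvSBStep ([], [])).2 ↔
      ∃ o ∈ orders, pvKindSell o = false ∧ p = pvPair o := fun p => by
    rw [(pvSellBuyMem orders [] [] p).2]; simp
  have hg : ∀ p : String × String,
      p ∈ orders.foldl (fun t o => PySem.Set.add t (pvSig o))
        ([] : PySem.Set (String × String)) ↔ ∃ o ∈ orders, p = pvSig o := fun p => by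
    rw [pvSigMem orders [] p]; simp
  unfold pvP
  constructor
  · rintro (⟨p, hp, hrp⟩ | ⟨p, hp, hrp⟩ | ⟨p, hp1, hp2⟩)
    · obtain ⟨o, ho, hk, rfl⟩ := (hs _).mp hp
      obtain ⟨o', ho', hk', he'⟩ := (hs _).mp hrp
      exact ⟨pvPair o, (hg _).mpr ⟨o, ho, by simp [pvSig_eq, hk]⟩,
        (hg _).mpr ⟨o', ho', by simp [pvSig_eq, hk', ← he']⟩⟩
    · obtain ⟨o, ho, hk, rfl⟩ := (hb _).mp hp
      obtain ⟨o', ho', hk', he'⟩ := (hb _).mp hrp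
      exact ⟨((pvPair o).2, (pvPair o).1),
        (hg _).mpr ⟨o, ho, by simp [pvSig_eq, hk]⟩,
        (hg _).mpr ⟨o', ho', by simp [pvSig_eq, hk', ← he']⟩⟩
    · obtain ⟨o, ho, hk, rfl⟩ := (hs _).mp hp1
      obtain ⟨o', ho', hk', he'⟩ := (hb _).mp hp2
      exact ⟨pvPair o, (hg _).mpr ⟨o, ho, by simp [pvSig_eq, hk]⟩,
        (hg _).mpr ⟨o', ho', by simp [pvSig_eq, hk', ← he']⟩⟩
  · rintro ⟨p, hp, hrp⟩
    obtain ⟨o, ho, rfl⟩ := (hg _).mp hp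
    obtain ⟨o', ho', he'⟩ := (hg _).mp hrp
    by_cases hk : pvKindSell o <;> by_cases hk' : pvKindSell o'
    · -- both sell
      simp only [pvSig_eq, hk, hk', if_true] at he'
      exact Or.inl ⟨pvPair o, (hs _).mpr ⟨o, ho, hk, rfl⟩,
        (hs _).mpr ⟨o', ho', hk', he'⟩⟩
    · -- o sell, o' buy: the two lowered pairs coincide
      simp [pvSig_eq, hk, hk', Prod.ext_iff] at he'
      exact Or.inr (Or.inr ⟨pvPair o, (hs _).mpr ⟨o, ho, hk, rfl⟩,
        (hb _).mpr ⟨o', ho', Bool.eq_false_iff.mpr hk',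
          Prod.ext_iff.mpr ⟨he'.2, he'.1⟩⟩⟩)
    · -- o buy, o' sell
      simp [pvSig_eq, hk, hk'] at he'
      exact Or.inr (Or.inr ⟨pvPair o', (hs _).mpr ⟨o', ho', hk', rfl⟩,
        (hb _).mpr ⟨o, ho, Bool.eq_false_iff.mpr hk, he'.symm⟩⟩)
    · -- both buy
      simp [pvSig_eq, hk, hk'] at he'
      exact Or.inr (Or.inl ⟨pvPair o', (hb _).mpr ⟨o', ho', Bool.eq_false_iff.mpr hk', rfl⟩,
        (hb _).mpr ⟨o, ho, Bool.eq_false_iff.mpr hk, he'.symm⟩⟩)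

-- membership and nodup of a fold that adds two projections per element
theorem pvMemFoldAdd2 {α β : Type} [BEq β] [LawfulBEq β] (f g : α → β) :
    ∀ (l : List α) (t0 : PySem.Set β) (y : β),
    (y ∈ l.foldl (fun t x => PySem.Set.add (PySem.Set.add t (f x)) (g x)) t0 ↔
      y ∈ t0 ∨ ∃ x ∈ l, y = f x ∨ y = g x) := by
  intro l
  induction l with
  | nil => simp
  | cons a t ih =>
    intro t0 y
    simp only [List.foldl_cons, ih, PySem.Set.mem_add, List.mem_cons]
    constructor
    · rintro (((h | h) | h) | ⟨x, hx, h⟩)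
      · exact Or.inl h
      · exact Or.inr ⟨a, Or.inl rfl, Or.inl h⟩
      · exact Or.inr ⟨a, Or.inl rfl, Or.inr h⟩
      · exact Or.inr ⟨x, Or.inr hx, h⟩
    · rintro (h | ⟨x, rfl | hx, h⟩)
      · exact Or.inl (Or.inl (Or.inl h))
      · rcases h with h | h
        · exact Or.inl (Or.inl (Or.inr h))
        · exact Or.inl (Or.inr h)
      · exact Or.inr ⟨x, hx, h⟩

theorem pvNodupFoldAdd2 {α β : Type} [BEq β] [LawfulBEq β] (f g : α → β) :
    ∀ (l : List α) (t0 : PySem.Set β), t0.Nodup →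
    (l.foldl (fun t x => PySem.Set.add (PySem.Set.add t (f x)) (g x)) t0).Nodup := by
  intro l
  induction l with
  | nil => intro t0 h; exact h
  | cons a t ih =>
    intro t0 h
    exact ih _ (PySem.Set.nodup_add _ _ (PySem.Set.nodup_add _ _ h))

-- the two token sets have the same members, hence (both Nodup) the same size
theorem pvTokLen (orders : List (List (String × String))) :
    (orders.foldl (fun t o => PySem.Set.add (PySem.Set.add t (pvSellTok o)) (pvBuyTok o))
        ([] : PySem.Set String)).length =
    ((orders.foldl (fun t o => PySem.Set.add t (pvSig o))
        ([] : PySem.Set (String × String))).foldl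
        (fun t p => PySem.Set.add (PySem.Set.add t p.1) p.2) ([] : PySem.Set String)).length := by
  apply List.Perm.length_eq
  rw [List.perm_ext_iff_of_nodup (pvNodupFoldAdd2 _ _ _ _ List.nodup_nil)
    (pvNodupFoldAdd2 _ _ _ _ List.nodup_nil)]
  intro y
  rw [pvMemFoldAdd2, pvMemFoldAdd2]
  simp only [List.not_mem_nil, false_or]
  constructor
  · rintro ⟨o, ho, hy⟩
    refine ⟨pvSig o, (pvSigMem orders [] (pvSig o)).mpr (Or.inr ⟨o, ho, rfl⟩), ?_⟩
    rw [pvSig_eq]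
    rcases hy with rfl | rfl <;> by_cases hk : pvKindSell o <;>
      simp [hk, pvPair]
  · rintro ⟨p, hp, hy⟩
    rcases (pvSigMem orders [] p).mp hp with h | ⟨o, ho, rfl⟩
    · exact absurd h (by simp)
    · refine ⟨o, ho, ?_⟩
      rw [pvSig_eq] at hy
      by_cases hk : pvKindSell o <;>
        simp only [hk, if_true, Bool.false_eq_true, if_false] at hy <;>
        rcases hy with rfl | rfl
      · exact Or.inl rfl
      · exact Or.inr rfl
      · exact Or.inr rfl
      · exact Or.inl rfl

-- ===== VERDICT (by name: the statement is the Claim_ definition above) =====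
theorem categorize_auction_spec : Claim_equal_categorize_auction := by
  unfold Claim_equal_categorize_auction
  intro auction _ _
  unfold Spec_categorize_auction categorize_auction categorize_auction_alt
  set orders := (List.lookup "orders" auction).getD [] with horders
  by_cases h0 : orders.length = 0
  · simp [h0]
  by_cases h1 : orders.length = 1
  · simp [h1]
  simp only [h0, h1, if_false]
  have hdet := pvDetect orders [] [] [] (by simp [pvP])
  set sigs := orders.foldl (fun t o => PySem.Set.add t (pvSig o))
    ([] : PySem.Set (String × String)) with hsigs
  have hiff : pvP (orders.foldl pvSBStep ([], [])).1 (orders.foldl pvSBStep ([], [])).2 ↔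
      ∃ p ∈ sigs, (p.2, p.1) ∈ sigs := pvP_iff_sig orders
  by_cases hp : ∃ p ∈ sigs, (p.2, p.1) ∈ sigs
  · have hA : (orders.foldl pvAStep ([], [], [])).1 ≠ [] := by
      intro hnil; exact (hdet.mp hnil) (hiff.mpr hp)
    have hB : (sigs.any (fun p => PySem.Set.contains sigs (p.2, p.1))) = true := by
      simp only [List.any_eq_true, PySem.Set.contains_iff]
      exact hp
    rw [if_pos hA, if_pos hB]
  · have hA : (orders.foldl pvAStep ([], [], [])).1 = [] :=
      hdet.mpr (fun hx => hp (hiff.mp hx))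
    have hB : ¬ ((sigs.any (fun p => PySem.Set.contains sigs (p.2, p.1))) = true) := by
      simp only [List.any_eq_true, PySem.Set.contains_iff]
      exact hp
    rw [if_neg (by simp [hA]), if_neg hB, pvTokLen]
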